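-- pv_equiv track=rewrite | github.com/santiagomariani/Fractal-Generator-Script-in-Python | fractal.py | realizar_espejado
-- ===== SOURCE A (Python) =====
-- def realizar_espejado(frs,ancho,alto,espejado_v,espejado_h):
--     fre = frs
--     if espejado_v == 1 and espejado_h == 1: return fre
--     elif espejado_v == 1 and espejado_h == 2: # espejado horizontal
--         for i in range(alto):
--             k = (ancho*2)-1
--             for j in range(ancho):
--                 if not (i,j) in fre:
--                     k -=1
--                     continue
--                 fre[(i,k)] = fre[(i,j)]
--                 k -= 1
--     elif espejado_v == 2 and espejado_h == 1: # espejado vertical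
--         for j in range(ancho):
--             k = (alto*2)-1
--             for i in range(alto):
--                 if not (i,j) in fre:
--                     k -=1
--                     continue
--                 fre[(k,j)] = fre[(i,j)]
--                 k -= 1
--     else: # espejado vertical y horizontal
--         for i in range(alto):
--             k = (ancho*2)-1
--             for j in range(ancho):
--                 if not (i,j) in fre:
--                     k -=1
--                     continue
--                 fre[(i,k)] = fre[(i,j)]
--                 k -= 1
--         for j in range(2*ancho):
--             k = (alto*2)-1
--             for i in range(alto):
--                 if not (i,j) in fre:
--                     k -=1
--                     continue
--                 fre[(k,j)] = fre[(i,j)]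
--                 k -= 1
--
--
--     return fre
-- ===== SOURCE B (Python) =====
-- # Mirrors only the points actually present: iterate the (sorted) existing keys of the
-- # sparse dict instead of scanning the whole ancho x alto grid.  Mutates frs in place,
-- # exactly like the original.
-- def _espejar_h(fre, ancho, alto):
--     # mirror each present in-box point across the vertical axis of the doubled width
--     for (i, j) in sorted(k for k in fre if 0 <= k[0] < alto and 0 <= k[1] < ancho):
--         fre[(i, 2 * ancho - 1 - j)] = fre[(i, j)]
--
-- def _espejar_v(fre, ancho, alto):
--     # mirror each present in-box point across the horizontal axis of the doubled height;
--     # written column-major (sorted by (column, row)) like the original's insertion order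
--     for (j, i) in sorted((k[1], k[0]) for k in fre if 0 <= k[0] < alto and 0 <= k[1] < ancho):
--         fre[(2 * alto - 1 - i, j)] = fre[(i, j)]
--
-- def realizar_espejado(frs, ancho, alto, espejado_v, espejado_h):
--     if espejado_v == 1 and espejado_h == 1:
--         return frs
--     elif espejado_v == 1 and espejado_h == 2:
--         _espejar_h(frs, ancho, alto)
--     elif espejado_v == 2 and espejado_h == 1:
--         _espejar_v(frs, ancho, alto)
--     else:
--         _espejar_h(frs, ancho, alto)
--         _espejar_v(frs, 2 * ancho, alto)
--     return frs
-- ===== Notes on version B (the rewrite author's own statement) =====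
-- stated objective: faster
-- what changed: Instead of scanning every (i,j) cell of the ancho x alto grid and testing membership, B iterates only the points actually present in the sparse dict (sorted into the grid's visit order so overwrites happen identically) and writes each mirror image directly.
import Mathlib
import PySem

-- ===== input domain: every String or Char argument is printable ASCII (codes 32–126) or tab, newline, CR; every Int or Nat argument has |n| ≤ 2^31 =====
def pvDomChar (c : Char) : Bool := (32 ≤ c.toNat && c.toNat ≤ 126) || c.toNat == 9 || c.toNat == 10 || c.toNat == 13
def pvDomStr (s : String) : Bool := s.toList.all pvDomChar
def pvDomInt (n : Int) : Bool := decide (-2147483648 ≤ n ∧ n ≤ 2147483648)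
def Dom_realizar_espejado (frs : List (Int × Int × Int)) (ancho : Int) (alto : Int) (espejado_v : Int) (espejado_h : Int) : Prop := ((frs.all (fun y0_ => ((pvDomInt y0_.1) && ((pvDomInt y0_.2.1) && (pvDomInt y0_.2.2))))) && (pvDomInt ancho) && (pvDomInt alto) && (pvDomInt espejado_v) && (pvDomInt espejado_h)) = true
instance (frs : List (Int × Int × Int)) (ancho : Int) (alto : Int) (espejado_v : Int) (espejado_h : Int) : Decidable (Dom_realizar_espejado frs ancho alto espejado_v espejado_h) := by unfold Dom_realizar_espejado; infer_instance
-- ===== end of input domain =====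

-- B mirrors only the points actually present in the sparse dict (iterating its sorted keys)
-- instead of probing every cell of the ancho × alto grid; both Pythons mutate the dict `frs`
-- in place in the same way, the equivalence proved here is about the returned dict's items.

-- The Python argument frs is a dict {(i, j): v}; under the type convention it arrives as the
-- association list of its items.  Both ports build the dict the way Python builds it
-- (left-to-right insertion, overwrite keeps the position) and return its items at the end.
def pvToDict (frs : List (Int × Int × Int)) : PySem.Dict (Int × Int) Int :=
  frs.foldl (fun d t => d.insert (t.1, t.2.1) t.2.2) PySem.Dict.empty

def pvFromDict (d : PySem.Dict (Int × Int) Int) : List (Int × Int × Int) :=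
  d.items.map (fun p => (p.1.1, p.1.2, p.2))

-- ===== PORT A =====

-- the 'espejado horizontal' double loop: for i in range(alto): k = ancho*2-1; for j in range(ancho): …
def pvA_h (fre0 : PySem.Dict (Int × Int) Int) (ancho alto : Int) : PySem.Dict (Int × Int) Int :=
  (PySem.List.pyRange 0 alto 1).foldl (fun fre i =>
    ((PySem.List.pyRange 0 ancho 1).foldl (fun st j =>
        match st.1.get? (i, j) with
        | none => (st.1, st.2 - 1)
        | some v => (st.1.insert (i, st.2) v, st.2 - 1))
      (fre, ancho * 2 - 1)).1) fre0

-- the 'espejado vertical' double loop, over columns j in range(w): k = alto*2-1; for i in range(alto): …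
-- (w = ancho in the pure vertical branch, w = 2*ancho in the second loop of the else branch)
def pvA_v (fre0 : PySem.Dict (Int × Int) Int) (w alto : Int) : PySem.Dict (Int × Int) Int :=
  (PySem.List.pyRange 0 w 1).foldl (fun fre j =>
    ((PySem.List.pyRange 0 alto 1).foldl (fun st i =>
        match st.1.get? (i, j) with
        | none => (st.1, st.2 - 1)
        | some v => (st.1.insert (st.2, j) v, st.2 - 1))
      (fre, alto * 2 - 1)).1) fre0

def realizar_espejado (frs : List (Int × Int × Int)) (ancho : Int) (alto : Int) (espejado_v : Int) (espejado_h : Int) : List (Int × Int × Int) :=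
  let fre := pvToDict frs
  if espejado_v = 1 ∧ espejado_h = 1 then pvFromDict fre
  else if espejado_v = 1 ∧ espejado_h = 2 then pvFromDict (pvA_h fre ancho alto)
  else if espejado_v = 2 ∧ espejado_h = 1 then pvFromDict (pvA_v fre ancho alto)
  else pvFromDict (pvA_v (pvA_h fre ancho alto) (2 * ancho) alto)

-- ===== PORT B =====

-- Source B's filter '0 <= k[0] < alto and 0 <= k[1] < ancho'
def pvInBox (alto ancho : Int) (k : Int × Int) : Bool :=
  decide (0 ≤ k.1) && decide (k.1 < alto) && decide (0 ≤ k.2) && decide (k.2 < ancho)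

-- Source B sorts the (i, j) pairs, i.e. lexicographically; every pair being sorted has
-- 0 ≤ second component < 2^32 (coordinates are in the box, Dom bounds the box), so the
-- injective integer key i * 2^32 + j realises exactly Python's order on those lists.
def pvEnc (k : Int × Int) : Int := k.1 * 4294967296 + k.2

-- Source B _espejar_h; the looked-up key (i, j) is one of the dict's own keys, never absent
-- (writes only touch columns ≥ ancho), so fre[(i, j)] is ported as getD with default 0
def pvB_h (fre0 : PySem.Dict (Int × Int) Int) (ancho alto : Int) : PySem.Dict (Int × Int) Int :=
  (PySem.List.sorted ((PySem.Dict.keys fre0).filter (pvInBox alto ancho)) pvEnc false).foldl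
    (fun fre k => fre.insert (k.1, 2 * ancho - 1 - k.2) (fre.getD k 0)) fre0

-- Source B _espejar_v (iterates the swapped pairs (j, i) in sorted order; reads fre[(i, j)],
-- which is again always present: writes only touch rows ≥ alto)
def pvB_v (fre0 : PySem.Dict (Int × Int) Int) (ancho alto : Int) : PySem.Dict (Int × Int) Int :=
  (PySem.List.sorted (((PySem.Dict.keys fre0).filter (pvInBox alto ancho)).map (fun k => (k.2, k.1))) pvEnc false).foldl
    (fun fre q => fre.insert (2 * alto - 1 - q.2, q.1) (fre.getD (q.2, q.1) 0)) fre0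

def realizar_espejado_alt (frs : List (Int × Int × Int)) (ancho : Int) (alto : Int) (espejado_v : Int) (espejado_h : Int) : List (Int × Int × Int) :=
  let fre := pvToDict frs
  if espejado_v = 1 ∧ espejado_h = 1 then pvFromDict fre
  else if espejado_v = 1 ∧ espejado_h = 2 then pvFromDict (pvB_h fre ancho alto)
  else if espejado_v = 2 ∧ espejado_h = 1 then pvFromDict (pvB_v fre ancho alto)
  else pvFromDict (pvB_v (pvB_h fre ancho alto) (2 * ancho) alto)

-- ===== PRECONDITION & SPEC =====
def Spec_realizar_espejado (frs : List (Int × Int × Int)) (ancho : Int) (alto : Int) (espejado_v : Int) (espejado_h : Int) (out : List (Int × Int × Int)) : Prop := out = realizar_espejado_alt frs ancho alto espejado_v espejado_h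
instance (frs : List (Int × Int × Int)) (ancho : Int) (alto : Int) (espejado_v : Int) (espejado_h : Int) (out : List (Int × Int × Int)) : Decidable (Spec_realizar_espejado frs ancho alto espejado_v espejado_h out) := by unfold Spec_realizar_espejado; infer_instance

-- ===== CLAIM (what is proved, stated in full; the proofs are below) =====
def Claim_equal_realizar_espejado : Prop := ∀ (frs : List (Int × Int × Int)) (ancho : Int) (alto : Int) (espejado_v : Int) (espejado_h : Int), Dom_realizar_espejado frs ancho alto espejado_v espejado_h → Spec_realizar_espejado frs ancho alto espejado_v espejado_h (realizar_espejado frs ancho alto espejado_v espejado_h)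

-- ===== LEMMAS AND PROOFS =====

-- the cells A's horizontal double loop visits, in visit order (row-major)
def pvRowMajor (alto ancho : Int) : List (Int × Int) :=
  (PySem.List.pyRange 0 alto 1).flatMap (fun i => (PySem.List.pyRange 0 ancho 1).map (fun j => (i, j)))

-- the cells A's vertical double loop visits, in visit order (column-major)
def pvColMajor (alto w : Int) : List (Int × Int) :=
  (PySem.List.pyRange 0 w 1).flatMap (fun j => (PySem.List.pyRange 0 alto 1).map (fun i => (i, j)))

-- A's counter k always equals 2*n-1-t at loop position t: the inner loop with (dict, k) state
-- is the flat fold indexed by the loop variable alone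
lemma pv_kelim (r : Int → Int × Int) (w : Int → Int → Int × Int) (n : Int) (m : Nat) :
    ∀ (t0 : Int) (d : PySem.Dict (Int × Int) Int), (n - t0).toNat ≤ m →
    ((PySem.List.pyRange t0 n 1).foldl (fun st t =>
        match st.1.get? (r t) with
        | none => (st.1, st.2 - 1)
        | some v => (st.1.insert (w st.2 t) v, st.2 - 1)) (d, 2 * n - 1 - t0)).1
    = (PySem.List.pyRange t0 n 1).foldl (fun d' t =>
        match d'.get? (r t) with
        | none => d'
        | some v => d'.insert (w (2 * n - 1 - t) t) v) d := by
  induction m with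
  | zero =>
    intro t0 d h
    rw [PySem.List.pyRange_one_eq_nil (by omega)]
    rfl
  | succ m ih =>
    intro t0 d h
    by_cases hlt : t0 < n
    · rw [PySem.List.pyRange_one_cons hlt]
      simp only [List.foldl_cons]
      have hstep : (2 : Int) * n - 1 - t0 - 1 = 2 * n - 1 - (t0 + 1) := by ring
      cases hg : d.get? (r t0) with
      | none => simpa [hg, hstep] using ih (t0 + 1) d (by omega)
      | some v => simpa [hg, hstep] using ih (t0 + 1) (d.insert (w (2 * n - 1 - t0) t0) v) (by omega)
    · rw [PySem.List.pyRange_one_eq_nil (by omega)]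
      rfl

-- the evolving-dict fold reads only inside the region R while writing only outside it,
-- so every read sees the snapshot d0
lemma pv_snap_match (f : Int × Int → Int × Int) (R : Int × Int → Bool)
    (hw : ∀ c, R c = true → R (f c) = false) :
    ∀ (cells : List (Int × Int)), (∀ c ∈ cells, R c = true) →
    ∀ (d0 d : PySem.Dict (Int × Int) Int), (∀ k, R k = true → d.get? k = d0.get? k) →
    cells.foldl (fun d' c => match d'.get? c with | none => d' | some v => d'.insert (f c) v) d
    = cells.foldl (fun d' c => match d0.get? c with | none => d' | some v => d'.insert (f c) v) d := by
  intro cells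
  induction cells with
  | nil => intro _ d0 d _; rfl
  | cons c cs ih =>
    intro hc d0 d hag
    have hcR : R c = true := hc c (by simp)
    simp only [List.foldl_cons, hag c hcR]
    cases hg : d0.get? c with
    | none => exact ih (fun x hx => hc x (by simp [hx])) d0 d hag
    | some v =>
      refine ih (fun x hx => hc x (by simp [hx])) d0 (d.insert (f c) v) ?_
      intro k hk
      have hne : k ≠ f c := by
        intro hEq; rw [hEq] at hk; rw [hw c hcR] at hk; exact Bool.false_ne_true hk
      rw [PySem.Dict.get?_insert_of_ne d v hne]
      exact hag k hk

-- with snapshot reads, absent cells are no-ops: keep only the present ones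
lemma pv_filter_fold (d0 : PySem.Dict (Int × Int) Int) (f : Int × Int → Int × Int) :
    ∀ (cells : List (Int × Int)) (d : PySem.Dict (Int × Int) Int),
    cells.foldl (fun d' c => match d0.get? c with | none => d' | some v => d'.insert (f c) v) d
    = (cells.filter (fun c => d0.contains c)).foldl (fun d' c => d'.insert (f c) (d0.getD c 0)) d := by
  intro cells
  induction cells with
  | nil => intro d; rfl
  | cons c cs ih =>
    intro d
    have hcontains : d0.contains c = (d0.get? c).isSome := PySem.Dict.contains_eq_isSome_get? d0 c
    cases hg : d0.get? c with
    | none =>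
      have : d0.contains c = false := by rw [hcontains, hg]; rfl
      simp only [List.foldl_cons, hg, List.filter_cons, this]
      exact ih d
    | some v =>
      have hct : d0.contains c = true := by rw [hcontains, hg]; rfl
      have hgd : d0.getD c 0 = v := PySem.Dict.getD_of_get?_eq_some d0 0 hg
      simp only [List.foldl_cons, hg, List.filter_cons, hct, if_true, hgd]
      exact ih (d.insert (f c) v)

-- same snapshot principle for B's fold shape (read key rk c inside R, write key wk c outside R)
lemma pv_snap_getD (wk rk : Int × Int → Int × Int) (R : Int × Int → Bool) :
    ∀ (cells : List (Int × Int)), (∀ c ∈ cells, R (rk c) = true ∧ R (wk c) = false) →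
    ∀ (d0 d : PySem.Dict (Int × Int) Int), (∀ k, R k = true → d.get? k = d0.get? k) →
    cells.foldl (fun d' c => d'.insert (wk c) (d'.getD (rk c) 0)) d
    = cells.foldl (fun d' c => d'.insert (wk c) (d0.getD (rk c) 0)) d := by
  intro cells
  induction cells with
  | nil => intro _ d0 d _; rfl
  | cons c cs ih =>
    intro hc d0 d hag
    obtain ⟨hr, hwFalse⟩ := hc c (by simp)
    have hread : d.getD (rk c) 0 = d0.getD (rk c) 0 := by
      rw [PySem.Dict.getD_eq_get?_getD, hag (rk c) hr, ← PySem.Dict.getD_eq_get?_getD]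
    simp only [List.foldl_cons, hread]
    refine ih (fun x hx => hc x (by simp [hx])) d0 (d.insert (wk c) (d0.getD (rk c) 0)) ?_
    intro k hk
    have hne : k ≠ wk c := by
      intro hEq; rw [hEq] at hk; rw [hwFalse] at hk; exact Bool.false_ne_true hk
    rw [PySem.Dict.get?_insert_of_ne _ _ hne]
    exact hag k hk

lemma pv_mem_rowMajor (alto ancho : Int) (c : Int × Int) :
    c ∈ pvRowMajor alto ancho ↔ 0 ≤ c.1 ∧ c.1 < alto ∧ 0 ≤ c.2 ∧ c.2 < ancho := by
  obtain ⟨i, j⟩ := c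
  simp [pvRowMajor, List.mem_flatMap, PySem.List.mem_pyRange_one, eq_comm, and_assoc]

lemma pv_mem_colMajor (alto w : Int) (c : Int × Int) :
    c ∈ pvColMajor alto w ↔ 0 ≤ c.1 ∧ c.1 < alto ∧ 0 ≤ c.2 ∧ c.2 < w := by
  obtain ⟨i, j⟩ := c
  simp [pvColMajor, List.mem_flatMap, PySem.List.mem_pyRange_one, eq_comm, and_assoc]
  tauto

lemma pv_pairwise_rowMajor (alto ancho : Int) (hW : ancho ≤ 4294967296) :
    (pvRowMajor alto ancho).Pairwise (fun a b => pvEnc a < pvEnc b) := by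
  rw [pvRowMajor, List.pairwise_flatMap]
  constructor
  · intro i _
    rw [List.pairwise_map]
    refine (PySem.List.pairwise_lt_pyRange_one 0 ancho).imp ?_
    intro a b hab
    simp only [pvEnc]
    omega
  · refine (PySem.List.pairwise_lt_pyRange_one 0 alto).imp_of_mem ?_
    intro a b _ _ hab x hx y hy
    simp only [List.mem_map] at hx hy
    obtain ⟨j, hj, rfl⟩ := hx
    obtain ⟨j', hj', rfl⟩ := hy
    rw [PySem.List.mem_pyRange_one] at hj hj'
    simp only [pvEnc]
    omega

lemma pv_pairwise_colMajor_swap (alto w : Int) (hH : alto ≤ 4294967296) :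
    (pvColMajor alto w).Pairwise (fun a b => pvEnc (a.2, a.1) < pvEnc (b.2, b.1)) := by
  rw [pvColMajor, List.pairwise_flatMap]
  constructor
  · intro j _
    rw [List.pairwise_map]
    refine (PySem.List.pairwise_lt_pyRange_one 0 alto).imp ?_
    intro a b hab
    simp only [pvEnc]
    omega
  · refine (PySem.List.pairwise_lt_pyRange_one 0 w).imp_of_mem ?_
    intro a b _ _ hab x hx y hy
    simp only [List.mem_map] at hx hy
    obtain ⟨i, hi, rfl⟩ := hx
    obtain ⟨i', hi', rfl⟩ := hy
    rw [PySem.List.mem_pyRange_one] at hi hi'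
    simp only [pvEnc]
    omega

lemma pv_nodup_of_pairwise_enc {l : List (Int × Int)} (h : l.Pairwise (fun a b => pvEnc a < pvEnc b)) :
    l.Nodup :=
  h.imp (fun hab => by intro hEq; rw [hEq] at hab; exact lt_irrefl _ hab)

-- the sorted filtered key list of d0 IS the row-major scan restricted to present cells
lemma pv_sorted_box_h (d0 : PySem.Dict (Int × Int) Int) (hn : d0.keys.Nodup)
    (alto ancho : Int) (hW : ancho ≤ 4294967296) :
    PySem.List.sorted ((PySem.Dict.keys d0).filter (pvInBox alto ancho)) pvEnc false
    = (pvRowMajor alto ancho).filter (fun c => d0.contains c) := by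
  have hpwRM := pv_pairwise_rowMajor alto ancho hW
  have hpw : ((pvRowMajor alto ancho).filter (fun c => d0.contains c)).Pairwise
      (fun a b => pvEnc a < pvEnc b) := hpwRM.filter _
  refine PySem.List.sorted_eq_of_perm_of_pairwise_lt _ _ _ ?_ hpw
  rw [List.perm_ext_iff_of_nodup (pv_nodup_of_pairwise_enc hpw) (hn.filter _)]
  intro c
  simp only [List.mem_filter, pv_mem_rowMajor, pvInBox, Bool.and_eq_true, decide_eq_true_eq,
    ← PySem.Dict.contains_iff_mem_keys]
  tauto

-- the sorted swapped filtered key list of d0 IS the column-major scan restricted to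
-- present cells, with each pair swapped
lemma pv_sorted_box_v (d0 : PySem.Dict (Int × Int) Int) (hn : d0.keys.Nodup)
    (alto w : Int) (hH : alto ≤ 4294967296) :
    PySem.List.sorted (((PySem.Dict.keys d0).filter (pvInBox alto w)).map (fun k => (k.2, k.1))) pvEnc false
    = ((pvColMajor alto w).filter (fun c => d0.contains c)).map (fun k => (k.2, k.1)) := by
  have hpwCM := pv_pairwise_colMajor_swap alto w hH
  have hpwF : ((pvColMajor alto w).filter (fun c => d0.contains c)).Pairwise
      (fun a b => pvEnc (a.2, a.1) < pvEnc (b.2, b.1)) := hpwCM.filter _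
  have hpw : (((pvColMajor alto w).filter (fun c => d0.contains c)).map (fun k => (k.2, k.1))).Pairwise
      (fun a b => pvEnc a < pvEnc b) := by
    rw [List.pairwise_map]; exact hpwF
  refine PySem.List.sorted_eq_of_perm_of_pairwise_lt _ _ _ ?_ hpw
  refine List.Perm.map _ ?_
  have hnodCM : ((pvColMajor alto w).filter (fun c => d0.contains c)).Nodup :=
    hpwF.imp (fun hab => by intro hEq; rw [hEq] at hab; exact lt_irrefl _ hab)
  rw [List.perm_ext_iff_of_nodup hnodCM (hn.filter _)]
  intro c
  simp only [List.mem_filter, pv_mem_colMajor, pvInBox, Bool.and_eq_true, decide_eq_true_eq,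
    ← PySem.Dict.contains_iff_mem_keys]
  tauto

lemma pv_pass_h (d0 : PySem.Dict (Int × Int) Int) (hn : d0.keys.Nodup)
    (ancho alto : Int) (hW : ancho ≤ 4294967296) :
    pvA_h d0 ancho alto = pvB_h d0 ancho alto := by
  -- A's double loop, with the counter k eliminated, is the flat fold over the row-major cells
  have hstep1 : pvA_h d0 ancho alto
      = (pvRowMajor alto ancho).foldl (fun d' c =>
          match d'.get? c with
          | none => d'
          | some v => d'.insert (c.1, 2 * ancho - 1 - c.2) v) d0 := by
    rw [pvA_h, pvRowMajor, List.foldl_flatMap]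
    refine PySem.List.foldl_congr_mem _ _ _ _ ?_
    intro fre i _
    rw [List.foldl_map]
    have h0 : ancho * 2 - 1 = 2 * ancho - 1 - 0 := by ring
    rw [h0]
    exact pv_kelim (fun j => (i, j)) (fun k _ => (i, k)) ancho (ancho - 0).toNat 0 fre (le_refl _)
  have hwOut : ∀ c : Int × Int, pvInBox alto ancho c = true →
      pvInBox alto ancho (c.1, 2 * ancho - 1 - c.2) = false := by
    intro c hc
    simp only [pvInBox, Bool.and_eq_true, decide_eq_true_eq] at hc
    simp only [pvInBox, Bool.and_eq_false_iff, decide_eq_false_iff_not]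
    omega
  have hstep2 : (pvRowMajor alto ancho).foldl (fun d' c =>
          match d'.get? c with
          | none => d'
          | some v => d'.insert (c.1, 2 * ancho - 1 - c.2) v) d0
      = (pvRowMajor alto ancho).foldl (fun d' c =>
          match d0.get? c with
          | none => d'
          | some v => d'.insert (c.1, 2 * ancho - 1 - c.2) v) d0 := by
    refine pv_snap_match (fun c => (c.1, 2 * ancho - 1 - c.2)) (pvInBox alto ancho) hwOut
      (pvRowMajor alto ancho) ?_ d0 d0 (fun _ _ => rfl)
    intro c hc
    rw [pv_mem_rowMajor] at hc
    simp only [pvInBox, Bool.and_eq_true, decide_eq_true_eq]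
    omega
  have hstep3 : (pvRowMajor alto ancho).foldl (fun d' c =>
          match d0.get? c with
          | none => d'
          | some v => d'.insert (c.1, 2 * ancho - 1 - c.2) v) d0
      = ((pvRowMajor alto ancho).filter (fun c => d0.contains c)).foldl
          (fun d' c => d'.insert (c.1, 2 * ancho - 1 - c.2) (d0.getD c 0)) d0 :=
    pv_filter_fold d0 (fun c => (c.1, 2 * ancho - 1 - c.2)) (pvRowMajor alto ancho) d0
  -- B's fold also reads only inside the box and writes only outside it
  have hstepB : pvB_h d0 ancho alto
      = (PySem.List.sorted ((PySem.Dict.keys d0).filter (pvInBox alto ancho)) pvEnc false).foldl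
          (fun fre k => fre.insert (k.1, 2 * ancho - 1 - k.2) (d0.getD k 0)) d0 := by
    rw [pvB_h]
    refine pv_snap_getD (fun k => (k.1, 2 * ancho - 1 - k.2)) (fun k => k) (pvInBox alto ancho)
      _ ?_ d0 d0 (fun _ _ => rfl)
    intro c hc
    rw [PySem.List.mem_sorted, List.mem_filter] at hc
    exact ⟨hc.2, hwOut c hc.2⟩
  rw [hstep1, hstep2, hstep3, hstepB, pv_sorted_box_h d0 hn alto ancho hW]

lemma pv_pass_v (d0 : PySem.Dict (Int × Int) Int) (hn : d0.keys.Nodup)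
    (w alto : Int) (hH : alto ≤ 4294967296) :
    pvA_v d0 w alto = pvB_v d0 w alto := by
  have hstep1 : pvA_v d0 w alto
      = (pvColMajor alto w).foldl (fun d' c =>
          match d'.get? c with
          | none => d'
          | some v => d'.insert (2 * alto - 1 - c.1, c.2) v) d0 := by
    rw [pvA_v, pvColMajor, List.foldl_flatMap]
    refine PySem.List.foldl_congr_mem _ _ _ _ ?_
    intro fre j _
    rw [List.foldl_map]
    have h0 : alto * 2 - 1 = 2 * alto - 1 - 0 := by ring
    rw [h0]
    exact pv_kelim (fun i => (i, j)) (fun k _ => (k, j)) alto (alto - 0).toNat 0 fre (le_refl _)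
  have hwOut : ∀ c : Int × Int, pvInBox alto w c = true →
      pvInBox alto w (2 * alto - 1 - c.1, c.2) = false := by
    intro c hc
    simp only [pvInBox, Bool.and_eq_true, decide_eq_true_eq] at hc
    simp only [pvInBox, Bool.and_eq_false_iff, decide_eq_false_iff_not]
    omega
  have hstep2 : (pvColMajor alto w).foldl (fun d' c =>
          match d'.get? c with
          | none => d'
          | some v => d'.insert (2 * alto - 1 - c.1, c.2) v) d0
      = (pvColMajor alto w).foldl (fun d' c =>
          match d0.get? c with
          | none => d'
          | some v => d'.insert (2 * alto - 1 - c.1, c.2) v) d0 := by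
    refine pv_snap_match (fun c => (2 * alto - 1 - c.1, c.2)) (pvInBox alto w) hwOut
      (pvColMajor alto w) ?_ d0 d0 (fun _ _ => rfl)
    intro c hc
    rw [pv_mem_colMajor] at hc
    simp only [pvInBox, Bool.and_eq_true, decide_eq_true_eq]
    omega
  have hstep3 : (pvColMajor alto w).foldl (fun d' c =>
          match d0.get? c with
          | none => d'
          | some v => d'.insert (2 * alto - 1 - c.1, c.2) v) d0
      = ((pvColMajor alto w).filter (fun c => d0.contains c)).foldl
          (fun d' c => d'.insert (2 * alto - 1 - c.1, c.2) (d0.getD c 0)) d0 :=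
    pv_filter_fold d0 (fun c => (2 * alto - 1 - c.1, c.2)) (pvColMajor alto w) d0
  have hstepB : pvB_v d0 w alto
      = (PySem.List.sorted (((PySem.Dict.keys d0).filter (pvInBox alto w)).map (fun k => (k.2, k.1))) pvEnc false).foldl
          (fun fre q => fre.insert (2 * alto - 1 - q.2, q.1) (d0.getD (q.2, q.1) 0)) d0 := by
    rw [pvB_v]
    refine pv_snap_getD (fun q => (2 * alto - 1 - q.2, q.1)) (fun q => (q.2, q.1)) (pvInBox alto w)
      _ ?_ d0 d0 (fun _ _ => rfl)
    intro q hq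
    rw [PySem.List.mem_sorted, List.mem_map] at hq
    obtain ⟨c, hc, rfl⟩ := hq
    rw [List.mem_filter] at hc
    exact ⟨hc.2, hwOut (c.1, c.2) hc.2⟩
  rw [hstep1, hstep2, hstep3, hstepB, pv_sorted_box_v d0 hn alto w hH, List.foldl_map]

lemma pv_nodup_toDict (frs : List (Int × Int × Int)) : (pvToDict frs).keys.Nodup :=
  PySem.Dict.nodup_keys_foldl_insert_key frs (fun t => (t.1, t.2.1)) (fun _ t => t.2.2)
    PySem.Dict.empty PySem.Dict.nodup_keys_empty

lemma pv_nodup_pvB_h (d0 : PySem.Dict (Int × Int) Int) (hn : d0.keys.Nodup) (ancho alto : Int) :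
    (pvB_h d0 ancho alto).keys.Nodup := by
  rw [pvB_h]
  exact PySem.Dict.nodup_keys_foldl_insert_key _ (fun k => (k.1, 2 * ancho - 1 - k.2))
    (fun d k => d.getD k 0) d0 hn

-- ===== VERDICT (by name: the statement is the Claim_ definition above) =====
theorem realizar_espejado_spec : Claim_equal_realizar_espejado := by
  intro frs ancho alto espejado_v espejado_h hdom
  have hbounds : ancho ≤ 4294967296 ∧ alto ≤ 4294967296 := by
    unfold Dom_realizar_espejado pvDomInt at hdom
    simp only [Bool.and_eq_true, decide_eq_true_eq] at hdom
    omega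
  unfold Spec_realizar_espejado realizar_espejado realizar_espejado_alt
  split_ifs with h1 h2 h3
  · rfl
  · exact congrArg pvFromDict (pv_pass_h (pvToDict frs) (pv_nodup_toDict frs) ancho alto hbounds.1)
  · exact congrArg pvFromDict (pv_pass_v (pvToDict frs) (pv_nodup_toDict frs) ancho alto hbounds.2)
  · refine congrArg pvFromDict ?_
    rw [pv_pass_h (pvToDict frs) (pv_nodup_toDict frs) ancho alto hbounds.1]
    exact pv_pass_v (pvB_h (pvToDict frs) ancho alto)
      (pv_nodup_pvB_h (pvToDict frs) (pv_nodup_toDict frs) ancho alto) (2 * ancho) alto hbounds.2
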